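-- pv_equiv track=rewrite | github.com/P-Taeyoung/algorithm_study | 3_week/get_price_not_fall_periods.py | get_price_not_fall_periods_1
-- ===== SOURCE A (Python) =====
-- from collections import deque
--
-- def get_price_not_fall_periods_1(prices):
--     # 이 부분을 채워주세요!
--     answer_list = [0] * len(prices)
--     queue = deque()
--
--     for i in range(0, len(prices)):
--         queue.append(i)
--         while queue[0] != i:
--             k = queue.popleft()
--             answer_list[k] += 1
--
--             if prices[k] <= prices[i]:
--                 queue.append(k)
--
--     return answer_list
-- ===== SOURCE B (Python) =====
-- def get_price_not_fall_periods_1(prices):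
--     n = len(prices)
--     answer_list = [0] * n
--     stack = []
--     for i in range(n):
--         while stack and prices[stack[-1]] > prices[i]:
--             j = stack.pop()
--             answer_list[j] = i - j
--         stack.append(i)
--     for j in stack:
--         answer_list[j] = n - 1 - j
--     return answer_list
-- ===== Notes on version B (the rewrite author's own statement) =====
-- stated objective: faster
-- what changed: Replaced A's per-day rotating-queue simulation (every still-alive index is popped, counted and re-appended on each day) with a single-pass monotonic stack that assigns each index its whole span once, when the first lower price arrives, plus one closing pass for indices whose price never falls.
import Mathlib
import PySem

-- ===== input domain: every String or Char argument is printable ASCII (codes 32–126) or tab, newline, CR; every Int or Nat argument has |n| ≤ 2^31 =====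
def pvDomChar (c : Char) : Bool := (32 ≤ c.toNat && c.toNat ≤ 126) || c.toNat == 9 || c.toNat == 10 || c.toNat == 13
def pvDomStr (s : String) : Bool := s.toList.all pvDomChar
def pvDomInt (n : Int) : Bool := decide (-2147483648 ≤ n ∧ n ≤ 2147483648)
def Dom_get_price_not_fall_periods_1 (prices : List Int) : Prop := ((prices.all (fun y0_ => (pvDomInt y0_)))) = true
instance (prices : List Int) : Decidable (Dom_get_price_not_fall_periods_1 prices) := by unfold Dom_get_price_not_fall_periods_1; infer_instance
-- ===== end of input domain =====

-- B replaces A's O(n^2) rotating-queue simulation with a one-pass monotonic stack (objective: faster, asymptotic O(n)).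

-- ===== PORT A =====
-- answer_list[k] += 1
def pvBump (ans : List Int) (k : Nat) : List Int := ans.set k (ans.getD k 0 + 1)

-- the inner `while queue[0] != i` loop; fuel = queue length is always enough
-- (each element in front of i is popped exactly once; re-appended survivors land behind i)
def pvWhileA (prices : List Int) (i : Nat) : Nat → List Nat → List Int → List Nat × List Int
  | 0, q, ans => (q, ans)
  | fuel+1, q, ans =>
    match q with
    | [] => (q, ans)
    | k :: rest =>
      if k = i then (k :: rest, ans)
      else
        let ans' := pvBump ans k
        if prices.getD k 0 ≤ prices.getD i 0 then
          pvWhileA prices i fuel (rest ++ [k]) ans'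
        else
          pvWhileA prices i fuel rest ans'

def pvStepA (prices : List Int) (s : List Int × List Nat) (i : Nat) : List Int × List Nat :=
  let q := s.2 ++ [i]
  let r := pvWhileA prices i q.length q s.1
  (r.2, r.1)

def get_price_not_fall_periods_1 (prices : List Int) : List Int :=
  ((List.range prices.length).foldl (pvStepA prices)
    (List.replicate prices.length 0, [])).1

-- ===== PORT B =====
-- the inner `while stack and prices[stack[-1]] > prices[i]` loop (stack head = top)
def pvPopB (prices : List Int) (i : Nat) : List Nat → List Int → List Nat × List Int
  | [], ans => ([], ans)
  | t :: rest, ans =>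
    if prices.getD t 0 > prices.getD i 0 then
      pvPopB prices i rest (ans.set t ((i : Int) - (t : Int)))
    else (t :: rest, ans)

def pvStepB (prices : List Int) (s : List Int × List Nat) (i : Nat) : List Int × List Nat :=
  let r := pvPopB prices i s.2 s.1
  (r.2, i :: r.1)

def get_price_not_fall_periods_1_alt (prices : List Int) : List Int :=
  match (List.range prices.length).foldl (pvStepB prices)
      (List.replicate prices.length 0, []) with
  | (ans, st) => st.foldl (fun a j => a.set j ((prices.length : Int) - 1 - (j : Int))) ans

-- ===== PRECONDITION & SPEC =====
def Spec_get_price_not_fall_periods_1 (prices : List Int) (out : List Int) : Prop := out = get_price_not_fall_periods_1_alt prices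
instance (prices : List Int) (out : List Int) : Decidable (Spec_get_price_not_fall_periods_1 prices out) := by unfold Spec_get_price_not_fall_periods_1; infer_instance

-- ===== CLAIM (what is proved, stated in full; the proofs are below) =====
def Claim_equal_get_price_not_fall_periods_1 : Prop := ∀ (prices : List Int), Dom_get_price_not_fall_periods_1 prices → Spec_get_price_not_fall_periods_1 prices (get_price_not_fall_periods_1 prices)

-- ===== LEMMAS AND PROOFS =====

-- price at index k (every index reaching a getD below is in range)
def pAt (prices : List Int) (k : Nat) : Int := prices.getD k 0

-- "k is alive entering iteration i": the price never fell below prices[k] on (k, i)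
def aliveb (prices : List Int) (k i : Nat) : Bool :=
  (List.range i).all (fun j => !(decide (k < j)) || decide (pAt prices k ≤ pAt prices j))

lemma aliveb_iff (prices : List Int) (k i : Nat) :
    aliveb prices k i = true ↔ ∀ j, k < j → j < i → pAt prices k ≤ pAt prices j := by
  simp only [aliveb, List.all_eq_true, List.mem_range, Bool.or_eq_true, Bool.not_eq_eq_eq_not,
    Bool.not_true, decide_eq_false_iff_not, decide_eq_true_eq, not_lt]
  exact ⟨fun h j hk hj => ((h j hj).resolve_left (by omega)),
         fun h j hj => by by_cases hk : k < j
                          · exact Or.inr (h j hk hj)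
                          · exact Or.inl (by omega)⟩

-- queue/stack content entering iteration i: alive indices, newest (largest) first
def qspec (prices : List Int) (i : Nat) : List Nat :=
  ((List.range i).reverse).filter (fun k => aliveb prices k i)

-- number of iterations m < i in which index k receives its +1 in A
def cnt (prices : List Int) (k i : Nat) : Nat :=
  ((List.range i).filter (fun m => decide (k < m) && aliveb prices k m)).length

def ansAspec (prices : List Int) (i : Nat) : List Int :=
  (List.range prices.length).map (fun k => (cnt prices k i : Int))

def ansBspec (prices : List Int) (i : Nat) : List Int :=
  (List.range prices.length).map
    (fun k => if k < i ∧ aliveb prices k i = false then (cnt prices k prices.length : Int) else 0)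

lemma aliveb_mono (prices : List Int) {k m i : Nat} (h : m ≤ i)
    (ha : aliveb prices k i = true) : aliveb prices k m = true := by
  rw [aliveb_iff] at *
  exact fun j hk hj => ha j hk (by omega)

lemma aliveb_succ_of_lt (prices : List Int) {k i : Nat} (hk : k < i) :
    aliveb prices k (i+1) = (aliveb prices k i && decide (pAt prices k ≤ pAt prices i)) := by
  rw [Bool.eq_iff_iff, Bool.and_eq_true, decide_eq_true_eq, aliveb_iff, aliveb_iff]
  constructor
  · exact fun h => ⟨fun j hj hj' => h j hj (by omega), h i hk (by omega)⟩
  · rintro ⟨h1, h2⟩ j hj hj'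
    by_cases hji : j = i
    · subst hji; exact h2
    · exact h1 j hj (by omega)

lemma aliveb_self_succ (prices : List Int) (i : Nat) : aliveb prices i (i+1) = true := by
  rw [aliveb_iff]; intro j h1 h2; omega

lemma countP_between (a b : Nat) : ∀ n,
    (List.range n).countP (fun m => decide (a < m ∧ m ≤ b)) = min (b+1) n - (a+1) := by
  intro n
  induction n with
  | zero => simp
  | succ n ih =>
    rw [List.range_succ, List.countP_append, ih]
    by_cases h : a < n ∧ n ≤ b <;> simp [h] <;> omega

lemma cnt_succ (prices : List Int) (k i : Nat) :
    cnt prices k (i+1) = cnt prices k i + (if k < i ∧ aliveb prices k i = true then 1 else 0) := by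
  unfold cnt
  rw [List.range_succ, List.filter_append, List.length_append]
  congr 1
  by_cases h : k < i ∧ aliveb prices k i = true <;> simp [h]

lemma cnt_of_fall (prices : List Int) {k i n : Nat} (hk : k < i) (hi : i < n)
    (ha : aliveb prices k i = true) (hf : pAt prices i < pAt prices k) :
    cnt prices k n = i - k := by
  unfold cnt
  rw [← List.countP_eq_length_filter,
    List.countP_congr (q := fun m => decide (k < m ∧ m ≤ i)) ?_, countP_between]
  · omega
  · intro m _
    by_cases hm : m ≤ i
    · have : aliveb prices k m = true := aliveb_mono prices hm ha
      by_cases hkm : k < m <;> simp [this, hkm, hm]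
    · have hfalse : aliveb prices k m = false := by
        rw [Bool.eq_false_iff]
        intro hal
        exact absurd ((aliveb_iff prices k m).1 hal i hk (by omega)) (by omega)
      simp [hfalse, hm]

lemma cnt_of_alive (prices : List Int) {k n : Nat} (hk : k < n)
    (ha : aliveb prices k n = true) : cnt prices k n = n - 1 - k := by
  unfold cnt
  rw [← List.countP_eq_length_filter,
    List.countP_congr (q := fun m => decide (k < m ∧ m ≤ n - 1)) ?_, countP_between]
  · omega
  · intro m hm
    rw [List.mem_range] at hm
    have : aliveb prices k m = true := aliveb_mono prices (by omega) ha
    by_cases hkm : k < m <;> simp [this, hkm] <;> omega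

lemma mem_qspec (prices : List Int) (k i : Nat) :
    k ∈ qspec prices i ↔ (k < i ∧ aliveb prices k i = true) := by
  simp [qspec, List.mem_filter, List.mem_reverse, List.mem_range]

lemma nodup_qspec (prices : List Int) (i : Nat) : (qspec prices i).Nodup :=
  ((List.nodup_reverse.mpr (List.nodup_range)).filter _)

lemma qspec_succ (prices : List Int) (i : Nat) :
    qspec prices (i+1) =
      i :: (qspec prices i).filter (fun k => decide (pAt prices k ≤ pAt prices i)) := by
  unfold qspec
  rw [List.filter_filter]
  rw [show (List.range (i+1)).reverse = i :: (List.range i).reverse by simp [List.range_succ]]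
  rw [List.filter_cons]
  simp only [aliveb_self_succ, if_true]
  congr 1
  apply List.filter_congr
  intro k hk
  rw [List.mem_reverse, List.mem_range] at hk
  rw [aliveb_succ_of_lt prices hk, Bool.and_comm]

lemma qspec_pairwise (prices : List Int) (i : Nat) :
    (qspec prices i).Pairwise (fun a b => pAt prices b ≤ pAt prices a) := by
  have h0 : ((List.range i).reverse).Pairwise (fun a b : Nat => b < a) := by
    rw [List.pairwise_reverse]
    exact List.pairwise_lt_range
  have h1 : (qspec prices i).Pairwise (fun a b : Nat => b < a) :=
    h0.sublist (List.filter_sublist)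
  refine h1.imp_of_mem ?_
  intro a b ha hb hba
  rw [mem_qspec] at ha hb
  exact (aliveb_iff prices b i).1 hb.2 a hba ha.1

lemma getD_set' (l : List Int) (i j : Nat) (a : Int) :
    (l.set i a).getD j 0 = if i = j ∧ i < l.length then a else l.getD j 0 := by
  simp only [List.getD_eq_getElem?_getD, List.getElem?_set]
  split_ifs with h1 h2 <;> simp_all <;> omega

lemma getD_map_range' (n k : Nat) (f : Nat → Int) (h : k < n) :
    ((List.range n).map f).getD k 0 = f k := by
  simp [List.getD_eq_getElem?_getD, List.getElem?_map, List.getElem?_range, h]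

lemma eq_of_getD (l1 l2 : List Int) (hlen : l1.length = l2.length)
    (h : ∀ k, k < l1.length → l1.getD k 0 = l2.getD k 0) : l1 = l2 := by
  apply List.ext_getElem hlen
  intro k h1 h2
  have := h k h1
  rwa [List.getD_eq_getElem?_getD, List.getD_eq_getElem?_getD,
    List.getElem?_eq_getElem h1, List.getElem?_eq_getElem h2, Option.getD_some,
    Option.getD_some] at this

lemma foldl_bump_length : ∀ (L : List Nat) (ans : List Int),
    (L.foldl pvBump ans).length = ans.length := by
  intro L
  induction L with
  | nil => simp
  | cons a L ih => intro ans; simp [List.foldl_cons, ih, pvBump]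

lemma foldl_bump_getD : ∀ (L : List Nat) (ans : List Int),
    (∀ a ∈ L, a < ans.length) → ∀ k,
    (L.foldl pvBump ans).getD k 0 = ans.getD k 0 + (L.count k : Int) := by
  intro L
  induction L with
  | nil => simp
  | cons a L ih =>
    intro ans hdom k
    rw [List.foldl_cons,
      ih (pvBump ans a) (by intro x hx; simpa [pvBump] using hdom x (List.mem_cons_of_mem a hx)) k]
    have ha : a < ans.length := hdom a List.mem_cons_self
    rw [List.count_cons]
    unfold pvBump
    rw [getD_set']
    by_cases hak : a = k
    · subst hak; simp [ha]; ring
    · have hka : (k == a) = false := by simp [Ne.symm hak]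
      simp [hak, ha, hka]

lemma foldl_set_length (v : Nat → Int) : ∀ (L : List Nat) (ans : List Int),
    (L.foldl (fun a j => a.set j (v j)) ans).length = ans.length := by
  intro L
  induction L with
  | nil => simp
  | cons a L ih => intro ans; simp [List.foldl_cons, ih]

lemma foldl_set_getD (v : Nat → Int) : ∀ (L : List Nat) (ans : List Int),
    L.Nodup → (∀ a ∈ L, a < ans.length) → ∀ k,
    (L.foldl (fun a j => a.set j (v j)) ans).getD k 0 =
      if k ∈ L then v k else ans.getD k 0 := by
  intro L
  induction L with
  | nil => simp
  | cons a L ih =>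
    intro ans hnd hdom k
    rw [List.foldl_cons, ih (ans.set a (v a)) hnd.of_cons
      (by intro x hx; simpa using hdom x (List.mem_cons_of_mem a hx)) k]
    have ha : a < ans.length := hdom a List.mem_cons_self
    have hanl : a ∉ L := (List.nodup_cons.mp hnd).1
    by_cases hkL : k ∈ L
    · simp [hkL, List.mem_cons_of_mem a hkL]
    · rw [getD_set']
      by_cases hak : a = k
      · subst hak; simp [ha, hkL]
      · rw [if_neg (show ¬(a = k ∧ a < ans.length) from fun h => hak h.1)]
        rw [if_neg (show k ∉ a :: L by
          simp only [List.mem_cons]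
          rintro (h | h)
          · exact hak h.symm
          · exact hkL h)]
        rw [if_neg hkL]

lemma whileA_spec (prices : List Int) (i : Nat) : ∀ (pre : List Nat), ∀ (post : List Nat)
    (ans : List Int) (fuel : Nat), i ∉ pre → pre.length < fuel →
    pvWhileA prices i fuel (pre ++ i :: post) ans =
      (i :: (post ++ pre.filter (fun k => decide (pAt prices k ≤ pAt prices i))),
        pre.foldl pvBump ans) := by
  intro pre
  induction pre with
  | nil =>
    intro post ans fuel _ hfuel
    obtain ⟨f, rfl⟩ : ∃ f, fuel = f + 1 := ⟨fuel - 1, by omega⟩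
    simp [pvWhileA]
  | cons a pre ih =>
    intro post ans fuel hmem hfuel
    obtain ⟨f, rfl⟩ : ∃ f, fuel = f + 1 := ⟨fuel - 1, by omega⟩
    have hai : ¬ (a = i) := by intro h; exact hmem (h ▸ List.mem_cons_self)
    have hni : i ∉ pre := fun h => hmem (List.mem_cons_of_mem a h)
    have hlen : pre.length < f := by simpa using Nat.lt_of_succ_lt_succ (by simpa using hfuel)
    simp only [List.cons_append, pvWhileA, if_neg hai]
    by_cases hs : prices.getD a 0 ≤ prices.getD i 0
    · rw [if_pos hs]
      have happ : (pre ++ i :: post) ++ [a] = pre ++ i :: (post ++ [a]) := by simp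
      rw [happ, ih (post ++ [a]) (pvBump ans a) f hni hlen]
      have : decide (pAt prices a ≤ pAt prices i) = true := by
        simpa [pAt] using hs
      simp [this]
    · rw [if_neg hs]
      rw [ih post (pvBump ans a) f hni hlen]
      have : decide (pAt prices a ≤ pAt prices i) = false := by
        simpa [pAt] using hs
      simp [this]

lemma qspec_len_lt (prices : List Int) (i : Nat) {k : Nat} (h : k ∈ qspec prices i) : k < i :=
  ((mem_qspec prices k i).1 h).1

lemma ansA_step (prices : List Int) (i : Nat) (hi : i < prices.length) :
    (qspec prices i).foldl pvBump (ansAspec prices i) = ansAspec prices (i+1) := by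
  apply eq_of_getD
  · rw [foldl_bump_length]; simp [ansAspec]
  · intro k hk
    rw [foldl_bump_length] at hk
    simp only [ansAspec, List.length_map, List.length_range] at hk
    rw [foldl_bump_getD _ _ (fun a ha => by
      simp only [ansAspec, List.length_map, List.length_range]
      exact lt_of_lt_of_le (qspec_len_lt prices i ha) (by omega))]
    unfold ansAspec
    rw [getD_map_range' _ _ _ hk, getD_map_range' _ _ _ hk, cnt_succ]
    have hcount : (qspec prices i).count k =
        if k < i ∧ aliveb prices k i = true then 1 else 0 := by
      by_cases h : k < i ∧ aliveb prices k i = true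
      · rw [if_pos h]
        exact List.count_eq_one_of_mem (nodup_qspec prices i) ((mem_qspec prices k i).2 h)
      · rw [if_neg h]
        exact List.count_eq_zero.2 (fun hm => h ((mem_qspec prices k i).1 hm))
    rw [hcount]
    split_ifs <;> push_cast <;> ring

lemma stepA_spec (prices : List Int) (i : Nat) (hi : i < prices.length) :
    pvStepA prices (ansAspec prices i, qspec prices i) i =
      (ansAspec prices (i+1), qspec prices (i+1)) := by
  unfold pvStepA
  have hni : i ∉ qspec prices i := fun h => absurd (qspec_len_lt prices i h) (by omega)
  have hfuel : (qspec prices i).length < (qspec prices i ++ [i]).length := by simp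
  simp only []
  rw [whileA_spec prices i (qspec prices i) [] (ansAspec prices i) _ hni hfuel]
  rw [ansA_step prices i hi, qspec_succ]
  simp

lemma A_loop (prices : List Int) : ∀ i, i ≤ prices.length →
    (List.range i).foldl (pvStepA prices) (List.replicate prices.length 0, []) =
      (ansAspec prices i, qspec prices i) := by
  intro i
  induction i with
  | zero =>
    intro _
    have h1 : ansAspec prices 0 = List.replicate prices.length 0 := by
      rw [List.eq_replicate_iff]
      refine ⟨by simp [ansAspec], ?_⟩
      intro b hb
      simp only [ansAspec] at hb
      obtain ⟨k, _, hk⟩ := List.mem_map.1 hb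
      simp [cnt, ← hk]
    have h2 : qspec prices 0 = [] := by simp [qspec]
    simp only [List.range_zero, List.foldl_nil]
    rw [Prod.mk.injEq]
    exact ⟨h1.symm, h2.symm⟩
  | succ i ih =>
    intro h
    rw [List.range_succ, List.foldl_append, ih (by omega), List.foldl_cons, List.foldl_nil,
      stepA_spec prices i (by omega)]

lemma popB_spec (prices : List Int) (i : Nat) : ∀ (st : List Nat) (ans : List Int),
    st.Pairwise (fun a b => pAt prices b ≤ pAt prices a) →
    pvPopB prices i st ans =
      (st.filter (fun k => decide (pAt prices k ≤ pAt prices i)),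
        (st.filter (fun k => !decide (pAt prices k ≤ pAt prices i))).foldl
          (fun a j => a.set j ((i : Int) - (j : Int))) ans) := by
  intro st
  induction st with
  | nil => intro ans _; simp [pvPopB]
  | cons t rest ih =>
    intro ans hpw
    by_cases hc : prices.getD t 0 > prices.getD i 0
    · have hd : decide (pAt prices t ≤ pAt prices i) = false := by
        simp only [pAt, decide_eq_false_iff_not, not_le]; omega
      simp only [pvPopB, if_pos hc]
      rw [ih _ hpw.of_cons]
      simp [hd]
    · have hd : decide (pAt prices t ≤ pAt prices i) = true := by
        simp only [pAt, decide_eq_true_eq]; omega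
      have hrest : ∀ b ∈ rest, pAt prices b ≤ pAt prices i := by
        intro b hb
        have h1 : pAt prices b ≤ pAt prices t := (List.pairwise_cons.1 hpw).1 b hb
        have h2 : pAt prices t ≤ pAt prices i := by simpa [pAt] using hc
        omega
      simp only [pvPopB, if_neg hc]
      rw [List.filter_cons, List.filter_cons, hd]
      simp only [Bool.not_true, if_pos]
      have hkeep : rest.filter (fun k => decide (pAt prices k ≤ pAt prices i)) = rest :=
        List.filter_eq_self.2 (fun b hb => by simp [hrest b hb])
      have hdead : rest.filter (fun k => !decide (pAt prices k ≤ pAt prices i)) = [] :=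
        List.filter_eq_nil_iff.2 (fun b hb => by simp [hrest b hb])
      simp [hkeep, hdead]

lemma ansB_step (prices : List Int) (i : Nat) (hi : i < prices.length) :
    ((qspec prices i).filter (fun k => !decide (pAt prices k ≤ pAt prices i))).foldl
        (fun a j => a.set j ((i : Int) - (j : Int))) (ansBspec prices i) =
      ansBspec prices (i+1) := by
  set D := (qspec prices i).filter (fun k => !decide (pAt prices k ≤ pAt prices i)) with hD
  have hmemD : ∀ k, k ∈ D ↔ (k < i ∧ aliveb prices k i = true ∧ pAt prices i < pAt prices k) := by
    intro k
    simp only [hD, List.mem_filter, mem_qspec, Bool.not_eq_eq_eq_not, Bool.not_true,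
      decide_eq_false_iff_not, not_le]
    tauto
  apply eq_of_getD
  · rw [foldl_set_length]; simp [ansBspec]
  · intro k hk
    rw [foldl_set_length] at hk
    simp only [ansBspec, List.length_map, List.length_range] at hk
    rw [foldl_set_getD _ _ _ ((nodup_qspec prices i).filter _)
      (fun a ha => by
        simp only [ansBspec, List.length_map, List.length_range]
        exact lt_of_lt_of_le ((hmemD a).1 ha).1 (by omega)) k]
    unfold ansBspec
    rw [getD_map_range' _ _ _ hk, getD_map_range' _ _ _ hk]
    by_cases hkD : k ∈ D
    · obtain ⟨h1, h2, h3⟩ := (hmemD k).1 hkD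
      have hdead : aliveb prices k (i+1) = false := by
        rw [aliveb_succ_of_lt prices h1, h2]
        simp; omega
      rw [if_pos hkD, if_pos ⟨by omega, hdead⟩,
        cnt_of_fall prices h1 hi h2 h3]
      omega
    · rw [if_neg hkD]
      by_cases hki : k < i
      · by_cases hal : aliveb prices k i = true
        · -- survivor: pAt k ≤ pAt i (else it would be in D)
          have hs : pAt prices k ≤ pAt prices i := by
            by_contra hcon
            exact hkD ((hmemD k).2 ⟨hki, hal, by omega⟩)
          have halive : aliveb prices k (i+1) = true := by
            rw [aliveb_succ_of_lt prices hki, hal]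
            simp [hs]
          rw [if_neg (by simp [hal]), if_neg (by simp [halive])]
        · -- already dead
          have hdead : aliveb prices k (i+1) = false := by
            rw [Bool.eq_false_iff]
            intro hcon
            exact hal (aliveb_mono prices (by omega) hcon)
          rw [if_pos ⟨hki, Bool.eq_false_iff.2 hal⟩, if_pos ⟨by omega, hdead⟩]
      · by_cases hki1 : k = i
        · subst hki1
          rw [if_neg (by omega), if_neg (by simp [aliveb_self_succ])]
        · rw [if_neg (by omega), if_neg (by omega)]

lemma stepB_spec (prices : List Int) (i : Nat) (hi : i < prices.length) :
    pvStepB prices (ansBspec prices i, qspec prices i) i =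
      (ansBspec prices (i+1), qspec prices (i+1)) := by
  unfold pvStepB
  simp only []
  rw [popB_spec prices i (qspec prices i) (ansBspec prices i) (qspec_pairwise prices i)]
  rw [ansB_step prices i hi, qspec_succ]

lemma B_loop (prices : List Int) : ∀ i, i ≤ prices.length →
    (List.range i).foldl (pvStepB prices) (List.replicate prices.length 0, []) =
      (ansBspec prices i, qspec prices i) := by
  intro i
  induction i with
  | zero =>
    intro _
    have h1 : ansBspec prices 0 = List.replicate prices.length 0 := by
      rw [List.eq_replicate_iff]
      refine ⟨by simp [ansBspec], ?_⟩
      intro b hb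
      simp only [ansBspec] at hb
      obtain ⟨k, _, hk⟩ := List.mem_map.1 hb
      simpa using hk.symm
    have h2 : qspec prices 0 = [] := by simp [qspec]
    simp only [List.range_zero, List.foldl_nil]
    rw [Prod.mk.injEq]
    exact ⟨h1.symm, h2.symm⟩
  | succ i ih =>
    intro h
    rw [List.range_succ, List.foldl_append, ih (by omega), List.foldl_cons, List.foldl_nil,
      stepB_spec prices i (by omega)]

-- ===== VERDICT (by name: the statement is the Claim_ definition above) =====
theorem get_price_not_fall_periods_1_spec : Claim_equal_get_price_not_fall_periods_1 := by
  unfold Claim_equal_get_price_not_fall_periods_1 Spec_get_price_not_fall_periods_1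
  intro prices _
  unfold get_price_not_fall_periods_1 get_price_not_fall_periods_1_alt
  rw [A_loop prices prices.length le_rfl, B_loop prices prices.length le_rfl]
  apply eq_of_getD
  · rw [foldl_set_length]
    simp [ansAspec, ansBspec]
  · intro k hk
    simp only [ansAspec, List.length_map, List.length_range] at hk
    rw [foldl_set_getD _ _ _ (nodup_qspec prices prices.length)
      (fun a ha => by
        simp only [ansBspec, List.length_map, List.length_range]
        exact qspec_len_lt prices prices.length ha) k]
    unfold ansAspec ansBspec
    rw [getD_map_range' _ _ _ hk, getD_map_range' _ _ _ hk]
    by_cases hmem : k ∈ qspec prices prices.length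
    · obtain ⟨h1, h2⟩ := (mem_qspec prices k prices.length).1 hmem
      rw [if_pos hmem, cnt_of_alive prices h1 h2]
      omega
    · have hdead : aliveb prices k prices.length = false := by
        rw [Bool.eq_false_iff]
        intro hcon
        exact hmem ((mem_qspec prices k prices.length).2 ⟨hk, hcon⟩)
      rw [if_neg hmem, if_pos ⟨hk, hdead⟩]
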